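-- pv_equiv track=rewrite | github.com/omicverse/py-dada2 | pydada2/paired.py | eval_pair
-- ===== SOURCE A (Python) =====
-- from typing import Any, Dict, List, Optional, Sequence, Tuple, Union
--
-- def eval_pair(s1: str, s2: str) -> Tuple[int, int, int]:
--     """Mirror C_eval_pair: count (matches, mismatches, indels) over the
--     *internal* (non-end-gap) alignment region of two aligned strings.
--     """
--     n = len(s1)
--     assert n == len(s2)
--     # find internal start
--     i = 0
--     while i < n and (s1[i] == "-" or s2[i] == "-"):
--         i += 1
--     j = n - 1
--     while j > i and (s1[j] == "-" or s2[j] == "-"):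
--         j -= 1
--     matches = mismatches = indels = 0
--     for k in range(i, j + 1):
--         if s1[k] == "-" or s2[k] == "-":
--             indels += 1
--         elif s1[k] == s2[k]:
--             matches += 1
--         else:
--             mismatches += 1
--     return matches, mismatches, indels
-- ===== SOURCE B (Python) =====
-- def eval_pair(s1: str, s2: str):
--     """Classify each column, strip end-gap columns, count the rest."""
--     assert len(s1) == len(s2)
--     c = ''.join(
--         'I' if a == '-' or b == '-' else ('M' if a == b else 'X')
--         for a, b in zip(s1, s2)
--     )
--     r = c.strip('I')
--     return r.count('M'), r.count('X'), r.count('I')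
-- ===== Notes on version B (the rewrite author's own statement) =====
-- stated objective: idiomatic
-- what changed: Replaces A's two index-walking while loops and indexed counting loop with a per-column classification string ('M'/'X'/'I') built by zip, stripped of end-gap columns with str.strip('I'), and counted with str.count.
import Mathlib
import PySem

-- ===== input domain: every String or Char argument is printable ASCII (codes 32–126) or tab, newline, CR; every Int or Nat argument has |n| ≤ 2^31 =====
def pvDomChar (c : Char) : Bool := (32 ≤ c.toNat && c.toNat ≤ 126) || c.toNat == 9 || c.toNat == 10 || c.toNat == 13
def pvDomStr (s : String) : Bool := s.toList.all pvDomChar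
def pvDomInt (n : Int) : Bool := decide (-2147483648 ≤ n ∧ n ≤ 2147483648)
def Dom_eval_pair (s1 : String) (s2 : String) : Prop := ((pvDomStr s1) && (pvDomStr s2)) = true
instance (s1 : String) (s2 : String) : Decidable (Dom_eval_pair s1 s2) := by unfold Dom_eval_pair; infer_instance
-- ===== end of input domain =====

-- B replaces A's index-walking while loops by a classification string stripped of
-- end-gap columns and counted; same O(n) cost, more idiomatic. Equal return values
-- are proved on Pre_ (equal lengths; elsewhere both Pythons raise AssertionError).

-- ===== PORT A =====
-- s1[k] == '-' or s2[k] == '-'  (indices are in range whenever A reads them)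
def pvGap (l1 l2 : List Char) (k : Nat) : Bool :=
  (l1.getD k ' ' == '-') || (l2.getD k ' ' == '-')

-- `i = 0; while i < n and (s1[i] == '-' or s2[i] == '-'): i += 1`
def pvStart (l1 l2 : List Char) (n i : Nat) : Nat :=
  if _h : i < n then
    if pvGap l1 l2 i then pvStart l1 l2 n (i + 1) else i
  else i
termination_by n - i
decreasing_by omega

-- `j = n - 1; while j > i and (s1[j] == '-' or s2[j] == '-'): j -= 1`
def pvEnd (l1 l2 : List Char) (i : Nat) (j : Int) : Int :=
  if _h : (i : Int) < j then
    if pvGap l1 l2 j.toNat then pvEnd l1 l2 i (j - 1) else j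
  else j
termination_by (j - i).toNat
decreasing_by omega

-- body of `for k in range(i, j + 1)`
def pvStep (l1 l2 : List Char) (acc : Int × Int × Int) (k : Int) : Int × Int × Int :=
  if pvGap l1 l2 k.toNat then (acc.1, acc.2.1, acc.2.2 + 1)
  else if l1.getD k.toNat ' ' == l2.getD k.toNat ' ' then (acc.1 + 1, acc.2.1, acc.2.2)
  else (acc.1, acc.2.1 + 1, acc.2.2)

def eval_pair (s1 : String) (s2 : String) : Int × Int × Int :=
  let l1 := s1.toList
  let l2 := s2.toList
  let n := l1.length
  let i := pvStart l1 l2 n 0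
  let j := pvEnd l1 l2 i ((n : Int) - 1)
  (PySem.List.pyRange (i : Int) (j + 1) 1).foldl (pvStep l1 l2) (0, 0, 0)

-- ===== PORT B =====
-- 'I' if a == '-' or b == '-' else ('M' if a == b else 'X')
def pvClass (a b : Char) : Char :=
  if a == '-' || b == '-' then 'I' else if a == b then 'M' else 'X'

def eval_pair_alt (s1 : String) (s2 : String) : Int × Int × Int :=
  let c := List.zipWith pvClass s1.toList s2.toList
  let r := PySem.Chars.stripChars c ['I']
  ((PySem.Chars.count r ['M'] : Int), (PySem.Chars.count r ['X'] : Int),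
   (PySem.Chars.count r ['I'] : Int))

-- ===== PRECONDITION & SPEC =====
-- Pre_ excludes exactly the inputs of unequal length, on which A's `assert` raises.
def Pre_eval_pair (s1 : String) (s2 : String) : Prop := s1.length = s2.length
instance (s1 : String) (s2 : String) : Decidable (Pre_eval_pair s1 s2) := by
  unfold Pre_eval_pair; infer_instance

def pvWitness_eval_pair : String × String := ("AC-G", "A-CG")

def Spec_eval_pair (s1 : String) (s2 : String) (out : Int × Int × Int) : Prop :=
  out = eval_pair_alt s1 s2
instance (s1 : String) (s2 : String) (out : Int × Int × Int) :
    Decidable (Spec_eval_pair s1 s2 out) := by unfold Spec_eval_pair; infer_instance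

-- ===== CLAIM (what is proved, stated in full; the proofs are below) =====
def Claim_equal_eval_pair : Prop := ∀ (s1 : String) (s2 : String),
  Dom_eval_pair s1 s2 → Pre_eval_pair s1 s2 → Spec_eval_pair s1 s2 (eval_pair s1 s2)

-- ===== LEMMAS AND PROOFS =====

-- Python's r.count('M') with a one-character pattern is List.count.
theorem pv_count_go_singleton (ch : Char) : ∀ (fuel : Nat) (l : List Char) (acc : Nat),
    l.length ≤ fuel → PySem.Chars.count.go [ch] fuel l acc = acc + l.count ch := by
  intro fuel
  induction fuel with
  | zero => intro l acc hl; cases l with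
    | nil => simp [PySem.Chars.count.go]
    | cons h t => simp at hl
  | succ f ih =>
    intro l acc hl
    cases l with
    | nil => simp [PySem.Chars.count.go]
    | cons h t =>
      by_cases hh : ch = h
      · subst hh
        simp [PySem.Chars.count.go, List.isPrefixOf, ih t (acc + 1) (by simpa using hl)]
        omega
      · simp [PySem.Chars.count.go, List.isPrefixOf, hh,
          ih t acc (by simpa using hl), Ne.symm hh]

theorem pv_count_singleton (s : List Char) (ch : Char) :
    PySem.Chars.count s [ch] = s.count ch := by
  simp [PySem.Chars.count, pv_count_go_singleton ch s.length s 0 le_rfl]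

theorem pv_dropWhile_eq_drop {α : Type} (p : α → Bool) (l : List α) :
    l.dropWhile p = l.drop (l.takeWhile p).length := by
  induction l with
  | nil => simp
  | cons h t ih =>
    by_cases hp : p h <;> simp [hp, ih]

theorem pv_tw_elem {α : Type} (p : α → Bool) (l : List α) (k : Nat)
    (hk : k < (l.takeWhile p).length) :
    p (l[k]'(lt_of_lt_of_le hk (List.takeWhile_prefix p).length_le)) = true := by
  have h1 := (List.takeWhile_prefix (l := l) p).getElem (i := k) hk
  have h2 := List.mem_takeWhile_imp (List.getElem_mem hk)
  rwa [h1] at h2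

theorem pv_tw_stop {α : Type} (p : α → Bool) (l : List α)
    (h : (l.takeWhile p).length < l.length) :
    p (l[(l.takeWhile p).length]) = false := by
  induction l with
  | nil => simp at h
  | cons x t ih =>
    by_cases hp : p x
    · simp only [List.takeWhile_cons_of_pos hp, List.length_cons] at h ⊢
      rw [List.getElem_cons_succ]
      exact ih (by omega)
    · simp only [List.takeWhile_cons_of_neg hp, List.length_nil, List.getElem_cons_zero]
      simp only [Bool.not_eq_true] at hp
      exact hp

-- the classification character at an in-range column
theorem pv_class_spec (l1 l2 : List Char) (h : l1.length = l2.length) (k : Nat)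
    (hk : k < l1.length) :
    (List.zipWith pvClass l1 l2)[k]'(by simp [List.length_zipWith]; omega) =
      (if pvGap l1 l2 k then 'I'
       else if l1.getD k ' ' == l2.getD k ' ' then 'M' else 'X') := by
  have hk2 : k < l2.length := by omega
  rw [List.getElem_zipWith]
  simp [pvClass, pvGap, List.getD, hk, hk2]

theorem pv_gap_eq_class (l1 l2 : List Char) (h : l1.length = l2.length) (k : Nat)
    (hk : k < l1.length) :
    pvGap l1 l2 k =
      ((List.zipWith pvClass l1 l2)[k]'(by simp [List.length_zipWith]; omega) == 'I') := by
  rw [pv_class_spec l1 l2 h k hk]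
  by_cases hg : pvGap l1 l2 k
  · simp [hg]
  · simp only [Bool.not_eq_true] at hg
    rw [hg, if_neg (by simp)]
    split <;> decide

-- A's first while loop finds the end of the leading all-'I' prefix.
theorem pv_start_eq (l1 l2 : List Char) (h : l1.length = l2.length) :
    ∀ (fuel i : Nat), l1.length - i ≤ fuel →
      pvStart l1 l2 l1.length i =
        i + (((List.zipWith pvClass l1 l2).drop i).takeWhile (· == 'I')).length := by
  intro fuel
  induction fuel with
  | zero =>
    intro i hf
    have hi : l1.length ≤ i := by omega
    rw [pvStart]
    simp [List.drop_eq_nil_of_le (by simp [List.length_zipWith]; omega : (List.zipWith pvClass l1 l2).length ≤ i), Nat.not_lt.mpr hi]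
  | succ f ih =>
    intro i hf
    rw [pvStart]
    by_cases hi : i < l1.length
    · have hiz : i < (List.zipWith pvClass l1 l2).length := by
        simp [List.length_zipWith]; omega
      rw [List.drop_eq_getElem_cons hiz, List.takeWhile_cons]
      by_cases hg : pvGap l1 l2 i
      · have : ((List.zipWith pvClass l1 l2)[i]'hiz == 'I') = true := by
          rw [← pv_gap_eq_class l1 l2 h i hi]; exact hg
        simp only [hi, dif_pos, hg, if_pos, this, List.length_cons]
        rw [ih (i + 1) (by omega)]
        omega
      · have hne : ((List.zipWith pvClass l1 l2)[i]'hiz == 'I') = false := by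
          rw [← pv_gap_eq_class l1 l2 h i hi]; simpa using hg
        rw [hne]
        simp [hi, hg]
    · rw [List.drop_eq_nil_of_le (by simp [List.length_zipWith]; omega : (List.zipWith pvClass l1 l2).length ≤ i)]
      simp [hi]

-- A's second while loop: result is the greatest non-gap column ≤ j (given gap-free i ≤ j).
theorem pv_end_spec (l1 l2 : List Char) (i : Nat) (hg : pvGap l1 l2 i = false) :
    ∀ (fuel : Nat) (j : Nat), i ≤ j → j - i ≤ fuel →
      ∃ r : Nat, pvEnd l1 l2 i (j : Int) = (r : Int) ∧ i ≤ r ∧ r ≤ j ∧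
        pvGap l1 l2 r = false ∧ ∀ m : Nat, r < m → m ≤ j → pvGap l1 l2 m = true := by
  intro fuel
  induction fuel with
  | zero =>
    intro j hij hf
    have : j = i := by omega
    subst this
    rw [pvEnd]
    simp [hg]
    omega
  | succ f ih =>
    intro j hij hf
    rw [pvEnd]
    by_cases hlt : i < j
    · simp only [Int.ofNat_lt.mpr hlt, dif_pos, Int.toNat_natCast]
      by_cases hgj : pvGap l1 l2 j
      · simp only [hgj, if_pos]
        have hcast : (j : Int) - 1 = ((j - 1 : Nat) : Int) := by omega
        rw [hcast]
        obtain ⟨r, hr1, hr2, hr3, hr4, hr5⟩ := ih (j - 1) (by omega) (by omega)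
        exact ⟨r, hr1, hr2, by omega, hr4, fun m hm1 hm2 => by
          by_cases hmj : m = j
          · subst hmj; exact hgj
          · exact hr5 m hm1 (by omega)⟩
      · simp only [hgj, Bool.false_eq_true, if_neg, not_false_iff]
        exact ⟨j, rfl, by omega, le_rfl, by simpa using hgj, fun m hm1 hm2 => by omega⟩
    · have : j = i := by omega
      subst this
      simp [hg]
      omega

-- A's counting loop over range(a, a+m) counts 'M'/'X'/'I' in the classification segment.
theorem pv_fold_eq (l1 l2 : List Char) (h : l1.length = l2.length) :
    ∀ (m a : Nat) (acc : Int × Int × Int), a + m ≤ l1.length →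
      (PySem.List.pyRange (a : Int) ((a : Int) + (m : Int)) 1).foldl (pvStep l1 l2) acc =
        (acc.1 + ((((List.zipWith pvClass l1 l2).drop a).take m).count 'M' : Int),
         acc.2.1 + ((((List.zipWith pvClass l1 l2).drop a).take m).count 'X' : Int),
         acc.2.2 + ((((List.zipWith pvClass l1 l2).drop a).take m).count 'I' : Int)) := by
  intro m
  induction m with
  | zero =>
    intro a acc _
    obtain ⟨x, y, z⟩ := acc
    rw [PySem.List.pyRange_one_eq_nil (by omega)]
    simp
  | succ m ih =>
    intro a acc ha
    have hcons : PySem.List.pyRange (a : Int) ((a : Int) + ((m + 1 : Nat) : Int)) 1 =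
        (a : Int) :: PySem.List.pyRange ((a : Int) + 1) ((a : Int) + ((m + 1 : Nat) : Int)) 1 :=
      PySem.List.pyRange_one_cons (by omega)
    have hsz : a < (List.zipWith pvClass l1 l2).length := by simp [List.length_zipWith]; omega
    have hseg : ((List.zipWith pvClass l1 l2).drop a).take (m + 1) =
        (List.zipWith pvClass l1 l2)[a]'hsz ::
          ((List.zipWith pvClass l1 l2).drop (a + 1)).take m := by
      rw [List.drop_eq_getElem_cons hsz]; rfl
    rw [hcons, List.foldl_cons, hseg]
    have hstep : (((a : Int)) + 1) = ((a + 1 : Nat) : Int) := by omega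
    have hrec := ih (a + 1) (pvStep l1 l2 acc (a : Int)) (by omega)
    rw [hstep, show ((a : Int) + ((m + 1 : Nat) : Int)) = (((a + 1 : Nat) : Int) + (m : Int)) by omega]
    rw [hrec]
    have hclass := pv_class_spec l1 l2 h a (by omega)
    simp only [pvStep, Int.toNat_natCast]
    rw [hclass]
    by_cases hg : pvGap l1 l2 a
    · simp [hg]
      omega
    · by_cases hm : l1.getD a ' ' == l2.getD a ' '
      · have hm' : l1[a]?.getD ' ' = l2[a]?.getD ' ' := by simpa [List.getD] using hm
        simp [hg, hm']
        omega
      · have hm' : ¬ l1[a]?.getD ' ' = l2[a]?.getD ' ' := by simpa [List.getD] using hm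
        simp [hg, hm']
        omega

-- the list-level equivalence, assembled from the loop characterisations
theorem pv_main (l1 l2 : List Char) (h : l1.length = l2.length) :
    (PySem.List.pyRange ((pvStart l1 l2 l1.length 0 : Nat) : Int)
        (pvEnd l1 l2 (pvStart l1 l2 l1.length 0) ((l1.length : Int) - 1) + 1) 1).foldl
      (pvStep l1 l2) (0, 0, 0) =
    (((PySem.Chars.stripChars (List.zipWith pvClass l1 l2) ['I']).count 'M' : Int),
     ((PySem.Chars.stripChars (List.zipWith pvClass l1 l2) ['I']).count 'X' : Int),
     ((PySem.Chars.stripChars (List.zipWith pvClass l1 l2) ['I']).count 'I' : Int)) := by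
  set w := List.zipWith pvClass l1 l2 with hc_def
  have hc : w.length = l1.length := by simp [hc_def, List.length_zipWith]; omega
  have hp : (fun x => List.contains ['I'] x) = (fun x : Char => x == 'I') := by
    funext x
    by_cases hx : x = 'I' <;> simp [hx]
  have hstrip : PySem.Chars.stripChars w ['I'] =
      ((w.dropWhile (· == 'I')).reverse.dropWhile (· == 'I')).reverse := by
    simp only [PySem.Chars.stripChars, hp]
  set i0 := (w.takeWhile (· == 'I')).length with hi0_def
  have hstart : pvStart l1 l2 l1.length 0 = i0 := by
    rw [pv_start_eq l1 l2 h l1.length 0 (by omega)]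
    simp [hi0_def, hc_def]
  have hi0_le : i0 ≤ w.length := (List.takeWhile_prefix _).length_le
  have hdw : w.dropWhile (· == 'I') = w.drop i0 := pv_dropWhile_eq_drop _ w
  by_cases hcase : i0 = w.length
  · -- every column is an end gap: both sides are (0, 0, 0)
    have hd : w.drop i0 = [] := List.drop_eq_nil_of_le (by omega)
    rw [hstrip, hdw, hd]
    rw [hstart, pvEnd]
    have : ¬ ((i0 : Int) < (l1.length : Int) - 1) := by omega
    rw [dif_neg this]
    rw [show ((l1.length : Int) - 1 + 1) = (l1.length : Int) by omega]
    rw [PySem.List.pyRange_one_eq_nil (by omega)]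
    simp
  · -- there is an internal region
    have hi0_lt : i0 < w.length := by omega
    set d := w.drop i0 with hd_def
    have hd_len : d.length = w.length - i0 := by simp [hd_def]
    have hd_pos : 0 < d.length := by omega
    have hd0 : d[0] = w[i0] := by simp [hd_def]
    have hstop : (w[i0] == 'I') = false := pv_tw_stop _ w hi0_lt
    -- gap ↔ class = 'I', in both directions, at any in-range column
    have hgap : ∀ k (hk : k < w.length), pvGap l1 l2 k = (w[k] == 'I') := by
      intro k hk
      exact pv_gap_eq_class l1 l2 h k (by omega)
    have hgap_i0 : pvGap l1 l2 i0 = false := by rw [hgap i0 hi0_lt]; exact hstop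
    set t := (d.reverse.takeWhile (· == 'I')).length with ht_def
    have ht_le : t ≤ d.length := by
      have := (List.takeWhile_prefix (l := d.reverse) (· == 'I')).length_le
      simpa using this
    have ht_lt : t < d.length := by
      rcases Nat.lt_or_ge t d.length with h1 | h1
      · exact h1
      · exfalso
        have htk : d.length - 1 < t := by omega
        have := pv_tw_elem (· == 'I') d.reverse (d.length - 1) (by simpa using htk)
        rw [List.getElem_reverse] at this
        have heq : d.length - 1 - (d.length - 1) = 0 := by omega
        simp only [heq] at this
        rw [hd0] at this
        rw [hstop] at this
        exact Bool.false_ne_true this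
    set m0 := d.length - t with hm0_def
    have hm0_pos : 0 < m0 := by omega
    -- trailing columns of d are 'I'
    have htrail : ∀ k (hk : k < d.length), m0 ≤ k → (d[k] == 'I') = true := by
      intro k hk hk2
      have hrk : d.length - 1 - k < t := by omega
      have := pv_tw_elem (· == 'I') d.reverse (d.length - 1 - k) (by simpa using hrk)
      rw [List.getElem_reverse] at this
      have heq : d.length - 1 - (d.length - 1 - k) = k := by omega
      simp only [heq] at this
      exact this
    -- the column just before the trailing gaps is not 'I'
    have hm1 : m0 - 1 < d.length := by omega
    have hlast : (d[m0 - 1] == 'I') = false := by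
      have := pv_tw_stop (· == 'I') d.reverse (by simpa using ht_lt)
      rw [List.getElem_reverse] at this
      have heq : d.length - 1 - (d.reverse.takeWhile (· == 'I')).length = m0 - 1 := by omega
      simp only [heq] at this
      exact this
    have hd_get : ∀ k (hk : k < d.length) (hk2 : i0 + k < w.length), d[k] = w[i0 + k] := by
      intro k hk hk2; simp [hd_def]
    -- run A's second loop
    obtain ⟨r, hr_eq, hr_ge, hr_le, hr_gap, hr_all⟩ :=
      pv_end_spec l1 l2 i0 hgap_i0 l1.length (l1.length - 1) (by omega) (by omega)
    -- identify r with the last non-'I' column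
    have hr_val : r = i0 + m0 - 1 := by
      rcases Nat.lt_trichotomy r (i0 + m0 - 1) with h1 | h1 | h1
      · exfalso
        have := hr_all (i0 + m0 - 1) (by omega) (by omega)
        rw [hgap (i0 + m0 - 1) (by omega)] at this
        have hge : (w[i0 + m0 - 1]'(by omega)) = d[m0 - 1] := by
          rw [hd_get (m0 - 1) (by omega) (by omega)]
          congr 1
          omega
        rw [hge, hlast] at this
        exact Bool.false_ne_true this
      · exact h1
      · exfalso
        have hrlt : r < w.length := by omega
        have hkk : r - i0 < d.length := by omega
        have := htrail (r - i0) hkk (by omega)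
        rw [hd_get (r - i0) hkk (by omega)] at this
        have heq2 : i0 + (r - i0) = r := by omega
        simp only [heq2] at this
        rw [hgap r hrlt, this] at hr_gap
        simp at hr_gap
    -- assemble: A's fold over [i0, r] = counts over d.take m0 = counts over the strip
    have hcast : ((l1.length : Int) - 1) = (((l1.length - 1 : Nat)) : Int) := by omega
    rw [hstart, hcast, hr_eq, hr_val]
    have hrange : ((i0 + m0 - 1 : Nat) : Int) + 1 = ((i0 : Nat) : Int) + ((m0 : Nat) : Int) := by
      omega
    rw [hrange]
    rw [pv_fold_eq l1 l2 h m0 i0 (0, 0, 0) (by omega)]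
    have hstrip_eq : PySem.Chars.stripChars w ['I'] = d.take m0 := by
      rw [hstrip, hdw, pv_dropWhile_eq_drop, List.reverse_drop]
      simp only [List.length_reverse, List.reverse_reverse, ← ht_def]
      rw [← hm0_def]
    rw [hstrip_eq, ← hd_def]
    simp

-- ===== VERDICT (by name: the statement is the Claim_ definition above) =====
theorem eval_pair_spec : Claim_equal_eval_pair := by
  intro s1 s2 _ hpre
  unfold Spec_eval_pair eval_pair eval_pair_alt
  have h : s1.toList.length = s2.toList.length := by
    have := hpre
    unfold Pre_eval_pair at this
    rw [String.length_toList, String.length_toList]; exact this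
  simp only [pv_count_singleton]
  exact pv_main s1.toList s2.toList h
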